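-- pv_equiv track=rewrite | github.com/yangxinxin-7/OpenViking | openviking/session/session.py | _parse_wm_sections
-- ===== SOURCE A (Python) =====
-- from typing import TYPE_CHECKING, Any, Dict, List, Optional
--
-- def _parse_wm_sections(text: str) -> Dict[str, str]:
--     """Parse an existing WM markdown into {header_line: body_text}.
--
--     Header comparison is case-sensitive on purpose: the update path only
--     uses this output to look up bodies by our own canonical headers.
--     """
--     sections: Dict[str, str] = {}
--     current: Optional[str] = None
--     buf: List[str] = []
--     for line in (text or "").splitlines():
--         stripped = line.strip()
--         if stripped.startswith("## "):
--             if current is not None: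
--                 sections[current] = "\n".join(buf).strip()
--             current = stripped
--             buf = []
--         elif current is not None:
--             buf.append(line)
--     if current is not None:
--         sections[current] = "\n".join(buf).strip()
--     return sections
-- ===== SOURCE B (Python) =====
-- def _is_header(line):
--     return line.strip().startswith("## ")
--
--
-- def _skip_to_header(lines):
--     """Drop everything before the first header line."""
--     for k, l in enumerate(lines):
--         if _is_header(l):
--             return lines[k:]
--     return []
--
--
-- def _split_body(lines):
--     """Return (body, rest): lines up to the next header, and the remainder."""
--     for k, l in enumerate(lines):
--         if _is_header(l):
--             return lines[:k], lines[k:]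
--     return lines, []
--
--
-- def _parse_wm_sections(text):
--     sections = {}
--     rest = _skip_to_header((text or "").splitlines())
--     while rest:
--         head, rest = rest[0], rest[1:]
--         body, rest = _split_body(rest)
--         sections[head.strip()] = "\n".join(body).strip()
--     return sections
-- ===== Notes on version B (the rewrite author's own statement) =====
-- stated objective: alternative
-- what changed: Replaces A's single-pass state machine (current header + buf accumulator carried through every line) by a header-driven split: skip to the first header, then repeatedly cut the body off up to the next header and emit one section per cut.
import Mathlib
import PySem

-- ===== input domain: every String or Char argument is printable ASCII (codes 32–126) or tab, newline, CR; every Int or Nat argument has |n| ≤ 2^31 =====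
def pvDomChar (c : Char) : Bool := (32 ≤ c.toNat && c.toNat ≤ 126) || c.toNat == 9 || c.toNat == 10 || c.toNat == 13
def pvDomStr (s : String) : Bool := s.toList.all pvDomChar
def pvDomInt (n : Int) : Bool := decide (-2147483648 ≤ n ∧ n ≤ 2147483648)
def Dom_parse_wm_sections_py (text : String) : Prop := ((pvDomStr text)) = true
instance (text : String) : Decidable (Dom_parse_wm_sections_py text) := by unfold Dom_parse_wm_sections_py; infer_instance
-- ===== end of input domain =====

-- B replaces A's one-pass state machine (current/buf accumulator) by a header-driven
-- split: skip to the first header, then repeatedly cut off the body up to the next header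
-- (objective: alternative decomposition, same cost).

-- ===== PORT A =====
-- state-machine loop of A: (sections, current, buf) over the lines
def pvLoopA : List String → PySem.Dict String String → Option String → List String →
    PySem.Dict String String
  | [], sections, current, buf =>
      match current with
      | some c => sections.insert c (PySem.Str.strip (PySem.Str.join "\n" buf))
      | none => sections
  | line :: rest, sections, current, buf =>
      let stripped := PySem.Str.strip line
      if PySem.Str.startswith stripped "## " then
        let sections' :=
          match current with
          | some c => sections.insert c (PySem.Str.strip (PySem.Str.join "\n" buf))
          | none => sections
        pvLoopA rest sections' (some stripped) []
      else
        match current with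
        | some _ => pvLoopA rest sections current (buf ++ [line])
        | none => pvLoopA rest sections current buf

def parse_wm_sections_py (text : String) : List (String × String) :=
  (pvLoopA (PySem.Str.splitlines (if text = "" then "" else text))
    PySem.Dict.empty none []).items

-- ===== PORT B =====
def pvIsHeader (line : String) : Bool :=
  PySem.Str.startswith (PySem.Str.strip line) "## "

-- _skip_to_header: drop everything before the first header line
def pvSkip : List String → List String
  | [] => []
  | l :: rest => if pvIsHeader l then l :: rest else pvSkip rest

-- _split_body: (body, rest) = lines up to the next header, and the remainder
def pvBody : List String → List String × List String
  | [] => ([], [])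
  | l :: rest =>
      if pvIsHeader l then ([], l :: rest)
      else
        let (b, r) := pvBody rest
        (l :: b, r)

theorem pvBody_snd_le (ls : List String) : (pvBody ls).2.length ≤ ls.length := by
  induction ls with
  | nil => simp [pvBody]
  | cons l rest ih =>
    simp only [pvBody]
    split
    · simp
    · simpa using Nat.le_succ_of_le ih

-- the while-loop of B over the remaining lines
def pvGoB : PySem.Dict String String → List String → PySem.Dict String String
  | sections, [] => sections
  | sections, h :: rest =>
      pvGoB (sections.insert (PySem.Str.strip h)
              (PySem.Str.strip (PySem.Str.join "\n" (pvBody rest).1)))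
        (pvBody rest).2
  termination_by _ ls => ls.length
  decreasing_by exact Nat.lt_succ_of_le (pvBody_snd_le rest)

def parse_wm_sections_py_alt (text : String) : List (String × String) :=
  (pvGoB PySem.Dict.empty
    (pvSkip (PySem.Str.splitlines (if text = "" then "" else text)))).items

-- ===== PRECONDITION & SPEC =====
def Spec_parse_wm_sections_py (text : String) (out : List (String × String)) : Prop := out = parse_wm_sections_py_alt text
instance (text : String) (out : List (String × String)) : Decidable (Spec_parse_wm_sections_py text out) := by unfold Spec_parse_wm_sections_py; infer_instance

-- ===== CLAIM (what is proved, stated in full; the proofs are below) =====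
def Claim_equal_parse_wm_sections_py : Prop := ∀ (text : String), Dom_parse_wm_sections_py text → Spec_parse_wm_sections_py text (parse_wm_sections_py text)

-- ===== LEMMAS AND PROOFS =====

-- inside a section (current = some c), A's loop finishes the current body with
-- the lines up to the next header and continues like B's loop from that header
theorem pvLoopA_some (lines : List String) : ∀ (secs : PySem.Dict String String)
    (c : String) (buf : List String),
    pvLoopA lines secs (some c) buf =
      pvGoB (secs.insert c
        (PySem.Str.strip (PySem.Str.join "\n" (buf ++ (pvBody lines).1))))
        (pvBody lines).2 := by
  induction lines with
  | nil => intro secs c buf; simp [pvLoopA, pvBody, pvGoB]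
  | cons l rest ih =>
    intro secs c buf
    by_cases h : pvIsHeader l
    · have hs : PySem.Str.startswith (PySem.Str.strip l) "## " = true := h
      simp only [pvLoopA, pvBody, pvIsHeader] at *
      rw [if_pos hs, if_pos hs, ih]
      simp [pvGoB]
    · simp only [pvLoopA, pvBody, pvIsHeader]
      rw [if_neg (by simpa [pvIsHeader] using h), if_neg (by simpa [pvIsHeader] using h), ih]
      simp

-- before any header (current = none), A's loop just skips lines, like pvSkip
theorem pvLoopA_none (lines : List String) : ∀ (secs : PySem.Dict String String),
    pvLoopA lines secs none [] = pvGoB secs (pvSkip lines) := by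
  induction lines with
  | nil => intro secs; simp [pvLoopA, pvSkip, pvGoB]
  | cons l rest ih =>
    intro secs
    by_cases h : pvIsHeader l
    · have hs : PySem.Str.startswith (PySem.Str.strip l) "## " = true := h
      simp only [pvLoopA, pvSkip]
      rw [if_pos hs, if_pos h, pvLoopA_some]
      simp [pvGoB]
    · simp only [pvLoopA, pvSkip]
      rw [if_neg (by simpa [pvIsHeader] using h), if_neg (by simp [h]), ih]

-- ===== VERDICT (by name: the statement is the Claim_ definition above) =====
theorem parse_wm_sections_py_spec : Claim_equal_parse_wm_sections_py := by
  intro text _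
  unfold Spec_parse_wm_sections_py parse_wm_sections_py parse_wm_sections_py_alt
  rw [pvLoopA_none]
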